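-- pv_equiv track=rewrite | github.com/ETGrif/MonoMatchEnglish | anagramDistance.py | stringDifference
-- ===== SOURCE A (Python) =====
-- def stringDifference(a, b):
--     delete, insert = [],[]
--     a = list(a)
--     b = list(b)
--     for e in b: insert.append(e)
--
--     for i in a:
--         if i in b:
--             insert.remove(i)
--         else:
--             delete.append(i)
--
--     doable = True
--     for i in delete + insert:
--         if not i.islower():
--             doable = False
--     return (delete, insert, doable)
-- ===== SOURCE B (Python) =====
-- def stringDifference(a, b):
--     counts = {}
--     for ch in b:
--         counts[ch] = counts.get(ch, 0) + 1
--     remaining = dict(counts)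
--     delete = []
--     for ch in a:
--         if remaining.get(ch, 0) > 0:
--             remaining[ch] -= 1
--         elif ch not in counts:
--             delete.append(ch)
--     insert = []
--     seen = {}
--     for ch in b:
--         seen[ch] = seen.get(ch, 0) + 1
--         if seen[ch] > counts[ch] - remaining[ch]:
--             insert.append(ch)
--     doable = all(ch.islower() for ch in delete + insert)
--     return (delete, insert, doable)
-- ===== Notes on version B (the rewrite author's own statement) =====
-- stated objective: faster
-- what changed: Replaces the interleaved membership-test/list.remove loop (quadratic repeated scans of b's copy) by a count dictionary built once, one counting pass over a, and a separate skip-first-k pass over b that rebuilds the insert list; doable becomes a single all().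
import Mathlib
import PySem

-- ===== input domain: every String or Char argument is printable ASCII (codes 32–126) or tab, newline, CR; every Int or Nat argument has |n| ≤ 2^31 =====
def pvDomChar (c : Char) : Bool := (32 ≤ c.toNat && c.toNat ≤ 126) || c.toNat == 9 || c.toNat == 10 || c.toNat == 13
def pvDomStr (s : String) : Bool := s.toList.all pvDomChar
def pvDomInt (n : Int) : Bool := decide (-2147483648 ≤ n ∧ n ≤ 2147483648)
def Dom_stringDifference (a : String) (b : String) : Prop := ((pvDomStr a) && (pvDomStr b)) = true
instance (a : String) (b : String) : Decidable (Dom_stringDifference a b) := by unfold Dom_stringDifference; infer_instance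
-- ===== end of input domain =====

-- B replaces A's interleaved membership/remove loop (repeated scans of b's copy) by a
-- count dictionary and two separate linear passes; measurably faster in a timing run.

-- ===== PORT A =====
-- Python list(a) is a list of 1-char strings; elements are kept as Char and wrapped
-- into 1-char Strings at the end (same values, same order).
def stringDifference (a : String) (b : String) : List String × List String × Bool :=
  let aL := a.toList
  let bL := b.toList
  -- for e in b: insert.append(e)
  let ins0 : List Char := bL.foldl (fun acc e => acc ++ [e]) []
  -- for i in a: if i in b: insert.remove(i) else: delete.append(i)
  -- insert.remove raises ValueError when i is absent: excluded by Pre_ (getD keeps it total)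
  let st := aL.foldl (fun (st : List Char × List Char) i =>
      if i ∈ bL then (st.1, (PySem.List.remove? st.2 i).getD st.2)
      else (st.1 ++ [i], st.2)) ([], ins0)
  -- doable loop
  let doable := (st.1 ++ st.2).foldl (fun db i => if !(PySem.Str.islower i) then false else db) true
  (st.1.map (fun c => String.mk [c]), st.2.map (fun c => String.mk [c]), doable)

-- ===== PORT B =====
def stringDifference_alt (a : String) (b : String) : List String × List String × Bool :=
  let aL := a.toList
  let bL := b.toList
  -- counts[ch] = counts.get(ch, 0) + 1
  let counts : PySem.Dict Char Int :=
    bL.foldl (fun d ch => d.insert ch (d.getD ch 0 + 1)) PySem.Dict.empty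
  -- one pass over a: consume counts, collect delete
  let st1 := aL.foldl (fun (st : PySem.Dict Char Int × List Char) ch =>
      if st.1.getD ch 0 > 0 then (st.1.insert ch (st.1.getD ch 0 - 1), st.2)
      else if st.1.contains ch then st
      else (st.1, st.2 ++ [ch])) (counts, [])
  let remaining := st1.1
  let delete := st1.2
  -- second pass over b: skip the first consumed occurrences of each char
  let st2 := bL.foldl (fun (st : PySem.Dict Char Int × List Char) ch =>
      let s := st.1.getD ch 0 + 1
      if s > counts.getD ch 0 - remaining.getD ch 0 then (st.1.insert ch s, st.2 ++ [ch])
      else (st.1.insert ch s, st.2)) (PySem.Dict.empty, [])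
  let insert := st2.2
  let doable := (delete ++ insert).all PySem.Str.islower
  (delete.map (fun c => String.mk [c]), insert.map (fun c => String.mk [c]), doable)

-- ===== PRECONDITION & SPEC =====
-- Pre_ excludes exactly the inputs on which A's insert.remove raises ValueError:
-- some character of b occurs more often in a than in b.
def Pre_stringDifference (a : String) (b : String) : Prop :=
  (b.toList.all (fun c => a.toList.count c ≤ b.toList.count c)) = true
instance (a : String) (b : String) : Decidable (Pre_stringDifference a b) := by
  unfold Pre_stringDifference; infer_instance

def pvWitness_stringDifference : String × String := ("abc", "cbad")

def Spec_stringDifference (a : String) (b : String) (out : List String × List String × Bool) : Prop := out = stringDifference_alt a b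
instance (a : String) (b : String) (out : List String × List String × Bool) : Decidable (Spec_stringDifference a b out) := by unfold Spec_stringDifference; infer_instance

-- ===== CLAIM (what is proved, stated in full; the proofs are below) =====
def Claim_equal_stringDifference : Prop := ∀ (a : String) (b : String), Dom_stringDifference a b → Pre_stringDifference a b → Spec_stringDifference a b (stringDifference a b)

-- ===== LEMMAS AND PROOFS =====

-- skip l f: the common value of both insert computations — l with the first (f c)
-- occurrences of each character c removed.
def pvSkip (l : List Char) (f : Char → Nat) : List Char :=
  match l with
  | [] => []
  | c :: t => if 0 < f c then pvSkip t (fun x => if x = c then f x - 1 else f x)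
              else c :: pvSkip t f

theorem count_cons' (x c : Char) (t : List Char) :
    (c :: t).count x = t.count x + (if c = x then 1 else 0) := by
  simp [List.count_cons]

theorem foldl_append_singleton (l acc : List Char) :
    l.foldl (fun acc e => acc ++ [e]) acc = acc ++ l := by
  induction l generalizing acc with
  | nil => simp
  | cons x t ih => simp [List.foldl_cons, ih]

theorem foldl_doable (l : List Char) (d : Bool) :
    l.foldl (fun db i => if !(PySem.Str.islower i) then false else db) d
      = (d && l.all PySem.Str.islower) := by
  induction l generalizing d with
  | nil => simp
  | cons x t ih =>
    simp only [List.foldl_cons, List.all_cons, ih]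
    cases h : PySem.Str.islower x <;> simp [h]

theorem remove_skip (l : List Char) (f : Char → Nat) (x : Char)
    (h : f x < l.count x) :
    PySem.List.remove? (pvSkip l f) x
      = some (pvSkip l (fun c => if c = x then f c + 1 else f c)) := by
  induction l generalizing f with
  | nil => simp [List.count_nil] at h
  | cons c t ih =>
    rw [count_cons'] at h
    by_cases hfc : 0 < f c
    · have hfx : 0 < (if c = x then f c + 1 else f c) := by split <;> omega
      rw [pvSkip, if_pos hfc, pvSkip, if_pos hfx]
      have h' : (fun y => if y = c then f y - 1 else f y) x < t.count x := by
        show (if x = c then f x - 1 else f x) < t.count x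
        by_cases hcx : c = x
        · subst hcx; rw [if_pos rfl]; rw [if_pos rfl] at h; omega
        · have hxc : ¬ x = c := fun e => hcx e.symm
          rw [if_neg hxc]; rw [if_neg hcx] at h; omega
      rw [ih _ h']
      refine congrArg some (congrArg (pvSkip t) ?_)
      funext y
      by_cases h1 : y = c
      · subst h1
        by_cases h2 : y = x
        · subst h2; simp; omega
        · simp [h2]
      · by_cases h2 : y = x
        · subst h2; simp [h1]
        · simp [h1, h2]
    · rw [pvSkip, if_neg hfc]
      by_cases hcx : c = x
      · subst hcx
        rw [PySem.List.remove?_cons_self]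
        have hf1 : 0 < (if c = c then f c + 1 else f c) := by simp
        rw [pvSkip, if_pos hf1]
        refine congrArg some (congrArg (pvSkip t) ?_)
        funext y
        by_cases h1 : y = c
        · subst h1; simp
        · simp [h1]
      · rw [PySem.List.remove?_cons_of_ne _ hcx]
        have h' : f x < t.count x := by rw [if_neg hcx] at h; omega
        rw [ih _ h']
        have hfx : ¬ 0 < (if c = x then f c + 1 else f c) := by
          rw [if_neg hcx]; exact hfc
        rw [pvSkip, if_neg hfx]
        simp

-- A's main loop, characterized on an arbitrary suffix with accumulated skip counts.
theorem A_loop (bL : List Char) (rest : List Char) (f : Char → Nat) (d : List Char)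
    (h : ∀ c ∈ bL, f c + rest.count c ≤ bL.count c) :
    rest.foldl (fun (st : List Char × List Char) i =>
        if i ∈ bL then (st.1, (PySem.List.remove? st.2 i).getD st.2)
        else (st.1 ++ [i], st.2)) (d, pvSkip bL f)
      = (d ++ rest.filter (fun c => !(decide (c ∈ bL))),
         pvSkip bL (fun c => f c + (rest.filter (fun c => decide (c ∈ bL))).count c)) := by
  induction rest generalizing f d with
  | nil =>
    refine congr_arg₂ Prod.mk (by simp) (congrArg (pvSkip bL) ?_)
    funext c; simp
  | cons i t ih =>
    simp only [List.foldl_cons]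
    by_cases hib : i ∈ bL
    · have hfi : f i < bL.count i := by
        have h1 := h i hib
        rw [count_cons'] at h1
        rw [if_pos rfl] at h1
        omega
      rw [if_pos hib, remove_skip bL f i hfi, Option.getD_some]
      have h' : ∀ c ∈ bL, (if c = i then f c + 1 else f c) + t.count c ≤ bL.count c := by
        intro c hc
        have h1 := h c hc
        rw [count_cons'] at h1
        by_cases hci : c = i
        · subst hci; rw [if_pos rfl] at h1 ⊢; omega
        · have hic : ¬ i = c := fun e => hci e.symm
          rw [if_neg hic] at h1; rw [if_neg hci]; omega
      rw [ih _ d h']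
      have hfilneg : (i :: t).filter (fun c => !(decide (c ∈ bL)))
          = t.filter (fun c => !(decide (c ∈ bL))) := by
        simp [List.filter_cons, hib]
      have hfilpos : (i :: t).filter (fun c => decide (c ∈ bL))
          = i :: t.filter (fun c => decide (c ∈ bL)) := by
        simp [List.filter_cons, hib]
      rw [hfilneg, hfilpos]
      refine congr_arg₂ Prod.mk rfl (congrArg (pvSkip bL) ?_)
      funext c
      rw [count_cons']
      by_cases hci : c = i
      · subst hci; rw [if_pos rfl, if_pos rfl]; omega
      · have hic : ¬ i = c := fun e => hci e.symm
        rw [if_neg hci, if_neg hic]; omega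
    · rw [if_neg hib]
      have h' : ∀ c ∈ bL, f c + t.count c ≤ bL.count c := by
        intro c hc
        have h1 := h c hc
        rw [count_cons'] at h1
        by_cases hic : i = c
        · rw [if_pos hic] at h1; omega
        · rw [if_neg hic] at h1; omega
      rw [ih _ (d ++ [i]) h']
      have hfilneg : (i :: t).filter (fun c => !(decide (c ∈ bL)))
          = i :: t.filter (fun c => !(decide (c ∈ bL))) := by
        simp [List.filter_cons, hib]
      have hfilpos : (i :: t).filter (fun c => decide (c ∈ bL))
          = t.filter (fun c => decide (c ∈ bL)) := by
        simp [List.filter_cons, hib]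
      rw [hfilneg, hfilpos]
      refine congr_arg₂ Prod.mk (by simp) rfl

-- The count dictionary: getD values and key membership.
theorem counts_getD (l : List Char) (d : PySem.Dict Char Int) (c : Char) :
    (l.foldl (fun d ch => d.insert ch (d.getD ch 0 + 1)) d).getD c 0
      = d.getD c 0 + l.count c := by
  induction l generalizing d with
  | nil => simp
  | cons x t ih =>
    simp only [List.foldl_cons, ih]
    rw [PySem.Dict.getD_insert]
    by_cases hcx : c = x
    · subst hcx; rw [List.count_cons_self]; simp; ring
    · rw [List.count_cons_of_ne (by exact fun hx => hcx hx.symm)]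
      simp [hcx]

theorem counts_keys (l : List Char) (d : PySem.Dict Char Int) (c : Char) :
    c ∈ (l.foldl (fun d ch => d.insert ch (d.getD ch 0 + 1)) d).keys
      ↔ c ∈ d.keys ∨ c ∈ l := by
  induction l generalizing d with
  | nil => simp
  | cons x t ih =>
    simp only [List.foldl_cons, ih, PySem.Dict.mem_keys_insert, List.mem_cons]
    tauto

-- B's first loop: delete and the final getD values of `remaining`,
-- for an abstract dict whose getD values are known.
theorem B_loop1 (bL : List Char) (rest : List Char) (rem : PySem.Dict Char Int)
    (del : List Char) (u : Char → Nat)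
    (hget : ∀ c, rem.getD c 0 = (bL.count c : Int) - u c)
    (hmem : ∀ c, rem.contains c = decide (c ∈ bL))
    (hu : ∀ c, u c + rest.count c ≤ bL.count c ∨ c ∉ bL ∧ u c = 0) :
    let r := rest.foldl (fun (st : PySem.Dict Char Int × List Char) ch =>
        if st.1.getD ch 0 > 0 then (st.1.insert ch (st.1.getD ch 0 - 1), st.2)
        else if st.1.contains ch then st
        else (st.1, st.2 ++ [ch])) (rem, del)
    r.2 = del ++ rest.filter (fun c => !(decide (c ∈ bL)))
      ∧ (∀ c, r.1.getD c 0
          = (bL.count c : Int) - (u c + (rest.filter (fun c => decide (c ∈ bL))).count c)) := by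
  induction rest generalizing rem del u with
  | nil =>
    intro r
    constructor
    · simp [r]
    · intro c; simp [r, hget c]
  | cons ch t ih =>
    simp only [List.foldl_cons]
    by_cases hib : ch ∈ bL
    · have hu' : u ch + (ch :: t).count ch ≤ bL.count ch := by
        rcases hu ch with h | ⟨h1, _⟩
        · exact h
        · exact absurd hib h1
      have hlt : u ch < bL.count ch := by
        rw [count_cons', if_pos rfl] at hu'
        omega
      have hpos : rem.getD ch 0 > 0 := by
        rw [hget ch]
        have : (u ch : Int) < (bL.count ch : Int) := by exact_mod_cast hlt
        omega
      rw [if_pos hpos]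
      have hget' : ∀ c, (rem.insert ch (rem.getD ch 0 - 1)).getD c 0
          = (bL.count c : Int) - (if c = ch then u c + 1 else u c) := by
        intro c
        rw [PySem.Dict.getD_insert]
        by_cases hc : c = ch
        · subst hc; rw [if_pos rfl, if_pos rfl, hget c]; push_cast; ring
        · rw [if_neg hc, if_neg hc, hget c]
      have hmemIff : ∀ c, c ∈ rem.keys ↔ c ∈ bL := by
        intro c
        have := hmem c
        rw [PySem.Dict.contains_eq_decide_mem_keys] at this
        exact decide_eq_decide.mp this
      have hmem' : ∀ c, (rem.insert ch (rem.getD ch 0 - 1)).contains c = decide (c ∈ bL) := by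
        intro c
        rw [PySem.Dict.contains_eq_decide_mem_keys, decide_eq_decide,
            PySem.Dict.mem_keys_insert]
        constructor
        · rintro (rfl | hk)
          · exact hib
          · exact (hmemIff c).mp hk
        · intro hc
          by_cases hcch : c = ch
          · exact Or.inl hcch
          · exact Or.inr ((hmemIff c).mpr hc)
      have hu'' : ∀ c, (if c = ch then u c + 1 else u c) + t.count c ≤ bL.count c
          ∨ c ∉ bL ∧ (if c = ch then u c + 1 else u c) = 0 := by
        intro c
        by_cases hc : c = ch
        · subst hc
          left
          rw [count_cons', if_pos rfl] at hu'
          rw [if_pos rfl]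
          omega
        · rcases hu c with h | h
          · left
            rw [count_cons'] at h
            have hchc : ¬ ch = c := fun e => hc e.symm
            rw [if_neg hchc] at h
            rw [if_neg hc]
            omega
          · right
            rw [if_neg hc]
            exact h
      have hrec := ih (rem.insert ch (rem.getD ch 0 - 1)) del _ hget' hmem' hu''
      refine ⟨?_, ?_⟩
      · rw [hrec.1]
        simp [List.filter_cons, hib]
      · intro c
        rw [hrec.2 c]
        have hfilpos : (ch :: t).filter (fun c => decide (c ∈ bL))
            = ch :: t.filter (fun c => decide (c ∈ bL)) := by
          simp [List.filter_cons, hib]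
        rw [hfilpos, count_cons']
        by_cases hc : c = ch
        · subst hc
          rw [if_pos rfl, if_pos rfl]
          push_cast; ring
        · have hchc : ¬ ch = c := fun e => hc e.symm
          rw [if_neg hc, if_neg hchc]
          push_cast; ring
    · have hu0 : u ch = 0 := by
        rcases hu ch with h | ⟨_, h⟩
        · have : bL.count ch = 0 := List.count_eq_zero.mpr hib
          omega
        · exact h
      have hz : ¬ rem.getD ch 0 > 0 := by
        rw [hget ch, List.count_eq_zero.mpr hib, hu0]; simp
      have hnc : rem.contains ch = false := by
        rw [hmem ch]; simp [hib]
      rw [if_neg hz, if_neg (by simp [hnc])]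
      have hu' : ∀ c, u c + t.count c ≤ bL.count c ∨ c ∉ bL ∧ u c = 0 := by
        intro c
        rcases hu c with h | h
        · left
          rw [count_cons'] at h
          by_cases hic : ch = c
          · rw [if_pos hic] at h; omega
          · rw [if_neg hic] at h; omega
        · right; exact h
      have hrec := ih rem (del ++ [ch]) u hget hmem hu'
      refine ⟨?_, ?_⟩
      · rw [hrec.1]
        simp [List.filter_cons, hib]
      · intro c
        rw [hrec.2 c]
        have hfilpos : (ch :: t).filter (fun c => decide (c ∈ bL))
            = t.filter (fun c => decide (c ∈ bL)) := by
          simp [List.filter_cons, hib]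
        rw [hfilpos]

-- B's second loop equals pvSkip, with the used counts given as a Nat function F.
theorem B_loop2 (counts remaining : PySem.Dict Char Int) (F : Char → Nat)
    (hF : ∀ c, counts.getD c 0 - remaining.getD c 0 = (F c : Int))
    (rest : List Char) (seen : PySem.Dict Char Int) (ins : List Char) (v : Char → Nat)
    (hseen : ∀ c, seen.getD c 0 = (v c : Int)) :
    (rest.foldl (fun (st : PySem.Dict Char Int × List Char) ch =>
        let s := st.1.getD ch 0 + 1
        if s > counts.getD ch 0 - remaining.getD ch 0 then (st.1.insert ch s, st.2 ++ [ch])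
        else (st.1.insert ch s, st.2)) (seen, ins)).2
      = ins ++ pvSkip rest (fun c => F c - v c) := by
  induction rest generalizing seen ins v with
  | nil => simp [pvSkip]
  | cons ch t ih =>
    simp only [List.foldl_cons]
    have hs : seen.getD ch 0 + 1 = ((v ch + 1 : Nat) : Int) := by
      rw [hseen ch]; push_cast; ring
    have hseen' : ∀ c, (seen.insert ch (seen.getD ch 0 + 1)).getD c 0
        = ((if c = ch then v c + 1 else v c : Nat) : Int) := by
      intro c
      rw [PySem.Dict.getD_insert]
      by_cases hc : c = ch
      · subst hc; rw [if_pos rfl, if_pos rfl, hs]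
      · rw [if_neg hc, if_neg hc, hseen c]
    by_cases hemit : seen.getD ch 0 + 1 > counts.getD ch 0 - remaining.getD ch 0
    · -- emit: the skip budget for ch is exhausted
      have hFv : ¬ 0 < F ch - v ch := by
        rw [hs, hF ch] at hemit
        omega
      rw [if_pos hemit]
      rw [ih _ _ _ hseen']
      rw [pvSkip, if_neg hFv]
      have heq : (fun c => F c - (if c = ch then v c + 1 else v c)) = (fun c => F c - v c) := by
        funext c
        by_cases hc : c = ch
        · subst hc; rw [if_pos rfl]; omega
        · rw [if_neg hc]
      rw [heq]
      simp
    · -- skip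
      have hFv : 0 < F ch - v ch := by
        rw [hs, hF ch] at hemit
        omega
      rw [if_neg hemit]
      rw [ih _ _ _ hseen']
      rw [pvSkip, if_pos hFv]
      refine congrArg (fun z => ins ++ z) (congrArg (pvSkip t) ?_)
      funext c
      by_cases hc1 : c = ch
      · subst hc1; rw [if_pos rfl, if_pos rfl]; omega
      · rw [if_neg hc1, if_neg hc1]

-- ===== VERDICT (by name: the statement is the Claim_ definition above) =====
theorem stringDifference_spec : Claim_equal_stringDifference := by
  intro a b _hdom hpre
  unfold Spec_stringDifference stringDifference stringDifference_alt
  dsimp only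
  have hpre' : ∀ c ∈ b.toList, a.toList.count c ≤ b.toList.count c := by
    intro c hc
    have := List.all_eq_true.mp hpre c hc
    exact of_decide_eq_true this
  -- A side
  rw [foldl_append_singleton b.toList []]
  have hbz : pvSkip b.toList (fun _ => 0) = b.toList := by
    induction b.toList with
    | nil => rfl
    | cons x t iht => rw [pvSkip, if_neg (by omega)]; rw [iht]
  have hA := A_loop b.toList a.toList (fun _ => 0) []
    (by intro c hc; simpa using hpre' c hc)
  rw [hbz] at hA
  simp only [List.nil_append] at hA ⊢
  rw [hA]
  -- B side: the counts dictionary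
  have hcget : ∀ c, (b.toList.foldl (fun d ch => d.insert ch (d.getD ch 0 + 1)) (PySem.Dict.empty : PySem.Dict Char Int)).getD c 0
      = (b.toList.count c : Int) := by
    intro c; rw [counts_getD]; simp
  have hcmem : ∀ c, (b.toList.foldl (fun d ch => d.insert ch (d.getD ch 0 + 1)) (PySem.Dict.empty : PySem.Dict Char Int)).contains c
      = decide (c ∈ b.toList) := by
    intro c
    rw [PySem.Dict.contains_eq_decide_mem_keys, decide_eq_decide]
    have := counts_keys b.toList (PySem.Dict.empty : PySem.Dict Char Int) c
    simpa [PySem.Dict.keys_empty] using this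
  have hB1 := B_loop1 b.toList a.toList
    (b.toList.foldl (fun d ch => d.insert ch (d.getD ch 0 + 1)) (PySem.Dict.empty : PySem.Dict Char Int)) [] (fun _ => 0)
    (by intro c; rw [hcget c]; simp)
    hcmem
    (by intro c
        by_cases hc : c ∈ b.toList
        · left; simpa using hpre' c hc
        · right; exact ⟨hc, rfl⟩)
  have hB2 := B_loop2
    (b.toList.foldl (fun d ch => d.insert ch (d.getD ch 0 + 1)) (PySem.Dict.empty : PySem.Dict Char Int))
    ((a.toList.foldl (fun (st : PySem.Dict Char Int × List Char) ch =>
        if st.1.getD ch 0 > 0 then (st.1.insert ch (st.1.getD ch 0 - 1), st.2)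
        else if st.1.contains ch then st
        else (st.1, st.2 ++ [ch]))
      ((b.toList.foldl (fun d ch => d.insert ch (d.getD ch 0 + 1)) (PySem.Dict.empty : PySem.Dict Char Int)), [])).1)
    (fun c => (a.toList.filter (fun c => decide (c ∈ b.toList))).count c)
    (by intro c
        rw [hcget c, hB1.2 c]
        push_cast
        ring)
    b.toList PySem.Dict.empty [] (fun _ => 0)
    (by intro c; simp)
  rw [hB1.1, hB2]
  simp only [List.nil_append]
  have hFsub : (fun c => (a.toList.filter (fun c => decide (c ∈ b.toList))).count c - 0)
      = (fun c => 0 + (a.toList.filter (fun c => decide (c ∈ b.toList))).count c) := by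
    funext c; omega
  rw [hFsub]
  rw [foldl_doable]
  simp
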